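-- pv_equiv track=rewrite | github.com/STS-Engineer/problem-solving-app-backend | app/services/chatbot_service.py | _fmt_d7_prevention
-- ===== SOURCE A (Python) =====
-- from typing import Dict, List, Optional, Any
--
-- def _val(v: Any, fallback: str = "—") -> str:
--     if v is None or v == "" or v == []:
--         return fallback
--     return str(v).strip() or fallback
--
-- def _fmt_d7_prevention(data: Dict) -> str:
--     lines = ["=== RISK OF RECURRENCE ELSEWHERE ==="]
--     risks = data.get("recurrence_risks") or []
--     if not risks:
--         lines.append("  (no risks defined)")
--     else:
--         for i, r in enumerate(risks, 1):
--             if not isinstance(r, dict):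
--                 continue
--             lines.append(f"  Risk #{i}:")
--             lines.append(
--                 f"    Area / Line / Product : {_val(r.get('area_line_product'))}"
--             )
--             lines.append(
--                 f"    Similar Risk Present  : {_val(r.get('similar_risk_present'))}"
--             )
--             lines.append(
--                 f"    Action Taken          : {_val(r.get('action_taken'))}"
--             )
--             lines.append("")
--     lines.append("=== REPLICATION VALIDATION ===")
--     reps = data.get("replication_validations") or []
--     if not reps:
--         lines.append("  (no replication records)")
--     else:
--         for i, r in enumerate(reps, 1):
--             if not isinstance(r, dict):
--                 continue
--             lines.append(f"  Replication #{i}:")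
--             lines.append(f"    Line / Site           : {_val(r.get('line_site'))}")
--             lines.append(
--                 f"    Action Replicated     : {_val(r.get('action_replicated'))}"
--             )
--             lines.append(
--                 f"    Confirmation Method   : {_val(r.get('confirmation_method'))}"
--             )
--             lines.append(
--                 f"    Confirmed By          : {_val(r.get('confirmed_by'))}"
--             )
--             lines.append("")
--     return "\n".join(lines)
-- ===== SOURCE B (Python) =====
-- # Different decomposition: no list-of-lines accumulator + join; instead each item is
-- # rendered recursively as one newline-terminated text chunk, chunks/sections are
-- # concatenated directly, and the final trailing newline is sliced off.
-- def _fmt_d7_prevention(data):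
--     def val(v, fallback="\u2014"):
--         if v is None or v == "" or v == []:
--             return fallback
--         return str(v).strip() or fallback
--
--     def entries(i, items, render):
--         if not items:
--             return ""
--         rest = entries(i + 1, items[1:], render)
--         r = items[0]
--         if not isinstance(r, dict):
--             return rest
--         return render(i, r) + rest
--
--     def risk(i, r):
--         return (f"  Risk #{i}:\n"
--                 f"    Area / Line / Product : {val(r.get('area_line_product'))}\n"
--                 f"    Similar Risk Present  : {val(r.get('similar_risk_present'))}\n"
--                 f"    Action Taken          : {val(r.get('action_taken'))}\n"
--                 "\n")
--
--     def rep(i, r):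
--         return (f"  Replication #{i}:\n"
--                 f"    Line / Site           : {val(r.get('line_site'))}\n"
--                 f"    Action Replicated     : {val(r.get('action_replicated'))}\n"
--                 f"    Confirmation Method   : {val(r.get('confirmation_method'))}\n"
--                 f"    Confirmed By          : {val(r.get('confirmed_by'))}\n"
--                 "\n")
--
--     def section(header, items, empty, render):
--         body = entries(1, items, render) if items else empty + "\n"
--         return header + "\n" + body
--
--     text = (section("=== RISK OF RECURRENCE ELSEWHERE ===",
--                     data.get("recurrence_risks") or [], "  (no risks defined)", risk)
--             + section("=== REPLICATION VALIDATION ===",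
--                       data.get("replication_validations") or [], "  (no replication records)", rep))
--     return text[:-1]
-- ===== Notes on version B (the rewrite author's own statement) =====
-- stated objective: alternative
-- what changed: Instead of appending lines to a shared list and joining with newlines, B renders each item recursively as one newline-terminated string chunk, concatenates headers/chunks/sections directly, and slices off the final trailing newline.
import Mathlib
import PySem

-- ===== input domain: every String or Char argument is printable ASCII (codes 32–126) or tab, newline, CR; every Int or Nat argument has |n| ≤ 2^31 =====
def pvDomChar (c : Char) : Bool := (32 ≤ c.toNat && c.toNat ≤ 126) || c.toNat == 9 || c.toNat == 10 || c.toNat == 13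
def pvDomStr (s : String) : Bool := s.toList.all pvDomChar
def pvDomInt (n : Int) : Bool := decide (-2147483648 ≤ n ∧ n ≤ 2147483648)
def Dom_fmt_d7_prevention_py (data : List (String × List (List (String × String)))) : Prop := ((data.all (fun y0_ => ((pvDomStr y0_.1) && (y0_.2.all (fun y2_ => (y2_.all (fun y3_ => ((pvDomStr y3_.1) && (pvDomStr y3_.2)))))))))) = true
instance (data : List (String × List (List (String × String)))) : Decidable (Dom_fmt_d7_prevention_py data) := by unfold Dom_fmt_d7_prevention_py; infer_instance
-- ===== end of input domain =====

-- B drops A's list-of-lines accumulator + join: it renders each item recursively as one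
-- newline-terminated chunk, concatenates chunks and sections directly, and slices off the
-- final newline (objective: alternative decomposition; same cost).

-- ===== PORT A =====
-- port of _val (shared module helper of Source A; on a string value the Python 'v == []' branch cannot fire)
def pvVal (v : Option String) : String :=
  match v with
  | none => "—"
  | some s =>
      if s = "" then "—"
      else
        let t := PySem.Str.strip s
        if t = "" then "—" else t

def fmt_d7_prevention_py (data : List (String × List (List (String × String)))) : String :=
  let lines : List String := ["=== RISK OF RECURRENCE ELSEWHERE ==="]
  let risks := (data.lookup "recurrence_risks").getD []
  let lines :=
    if risks = [] then lines ++ ["  (no risks defined)"]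
    else
      (PySem.List.enumerate risks 1).foldl (fun acc p =>
        acc ++ ["  Risk #" ++ PySem.Int.toStr p.1 ++ ":",
                "    Area / Line / Product : " ++ pvVal (p.2.lookup "area_line_product"),
                "    Similar Risk Present  : " ++ pvVal (p.2.lookup "similar_risk_present"),
                "    Action Taken          : " ++ pvVal (p.2.lookup "action_taken"),
                ""]) lines
  let lines := lines ++ ["=== REPLICATION VALIDATION ==="]
  let reps := (data.lookup "replication_validations").getD []
  let lines :=
    if reps = [] then lines ++ ["  (no replication records)"]
    else
      (PySem.List.enumerate reps 1).foldl (fun acc p =>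
        acc ++ ["  Replication #" ++ PySem.Int.toStr p.1 ++ ":",
                "    Line / Site           : " ++ pvVal (p.2.lookup "line_site"),
                "    Action Replicated     : " ++ pvVal (p.2.lookup "action_replicated"),
                "    Confirmation Method   : " ++ pvVal (p.2.lookup "confirmation_method"),
                "    Confirmed By          : " ++ pvVal (p.2.lookup "confirmed_by"),
                ""]) lines
  PySem.Str.join "\n" lines

-- ===== PORT B =====
-- Source B's 'entries': recursive, index-threading, newline-terminated chunk per item
-- (under this type every item is a dict, so the isinstance skip branch never fires)
def pvEntries (i : Int) (items : List (List (String × String)))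
    (render : Int → List (String × String) → String) : String :=
  match items with
  | [] => ""
  | r :: rest => render i r ++ pvEntries (i + 1) rest render

def pvRisk (i : Int) (r : List (String × String)) : String :=
  "  Risk #" ++ PySem.Int.toStr i ++ ":\n" ++
  "    Area / Line / Product : " ++ pvVal (r.lookup "area_line_product") ++ "\n" ++
  "    Similar Risk Present  : " ++ pvVal (r.lookup "similar_risk_present") ++ "\n" ++
  "    Action Taken          : " ++ pvVal (r.lookup "action_taken") ++ "\n" ++
  "\n"

def pvRep (i : Int) (r : List (String × String)) : String :=
  "  Replication #" ++ PySem.Int.toStr i ++ ":\n" ++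
  "    Line / Site           : " ++ pvVal (r.lookup "line_site") ++ "\n" ++
  "    Action Replicated     : " ++ pvVal (r.lookup "action_replicated") ++ "\n" ++
  "    Confirmation Method   : " ++ pvVal (r.lookup "confirmation_method") ++ "\n" ++
  "    Confirmed By          : " ++ pvVal (r.lookup "confirmed_by") ++ "\n" ++
  "\n"

def pvSection (header : String) (items : List (List (String × String))) (empty : String)
    (render : Int → List (String × String) → String) : String :=
  let body := if items ≠ [] then pvEntries 1 items render else empty ++ "\n"
  header ++ "\n" ++ body

def fmt_d7_prevention_py_alt (data : List (String × List (List (String × String)))) : String :=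
  let text :=
    pvSection "=== RISK OF RECURRENCE ELSEWHERE ==="
      ((data.lookup "recurrence_risks").getD []) "  (no risks defined)" pvRisk ++
    pvSection "=== REPLICATION VALIDATION ==="
      ((data.lookup "replication_validations").getD []) "  (no replication records)" pvRep
  PySem.Str.slice text none (some (-1))

-- ===== PRECONDITION & SPEC =====
def Spec_fmt_d7_prevention_py (data : List (String × List (List (String × String)))) (out : String) : Prop := out = fmt_d7_prevention_py_alt data
instance (data : List (String × List (List (String × String)))) (out : String) : Decidable (Spec_fmt_d7_prevention_py data out) := by unfold Spec_fmt_d7_prevention_py; infer_instance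

-- ===== CLAIM (what is proved, stated in full; the proofs are below) =====
def Claim_equal_fmt_d7_prevention_py : Prop := ∀ (data : List (String × List (List (String × String)))), Dom_fmt_d7_prevention_py data → Spec_fmt_d7_prevention_py data (fmt_d7_prevention_py data)

-- ===== LEMMAS AND PROOFS =====

-- newline-terminated concatenation of a line list, on char lists
def pvTerm (T : List (List Char)) : List Char := T.flatMap (· ++ ['\n'])

theorem pvTerm_eq_join (T : List (List Char)) (h : T ≠ []) :
    pvTerm T = PySem.Chars.join ['\n'] T ++ ['\n'] := by
  induction T with
  | nil => simp at h
  | cons x rest ih =>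
    cases rest with
    | nil => simp [pvTerm, PySem.Chars.join_singleton]
    | cons y r =>
      rw [PySem.Chars.join_cons_cons]
      simp only [pvTerm, List.flatMap_cons] at *
      rw [ih (by simp)]
      simp [List.append_assoc]

theorem pvEntries_toList (i : Int) (items : List (List (String × String)))
    (render : Int → List (String × String) → String) :
    (pvEntries i items render).toList
      = (PySem.List.enumerate items i).flatMap (fun p => (render p.1 p.2).toList) := by
  induction items generalizing i with
  | nil => simp [pvEntries, PySem.List.enumerate]
  | cons r rest ih => simp [pvEntries, PySem.List.enumerate, ih]

theorem pvRisk_toList (i : Int) (r : List (String × String)) :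
    (pvRisk i r).toList =
      pvTerm [("  Risk #" ++ PySem.Int.toStr i ++ ":").toList,
              ("    Area / Line / Product : " ++ pvVal (r.lookup "area_line_product")).toList,
              ("    Similar Risk Present  : " ++ pvVal (r.lookup "similar_risk_present")).toList,
              ("    Action Taken          : " ++ pvVal (r.lookup "action_taken")).toList,
              ("" : String).toList] := by
  have h1 : (":\n" : String).toList = ":".toList ++ ['\n'] := rfl
  simp [pvRisk, pvTerm, h1, List.append_assoc]

theorem pvRep_toList (i : Int) (r : List (String × String)) :
    (pvRep i r).toList =
      pvTerm [("  Replication #" ++ PySem.Int.toStr i ++ ":").toList,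
              ("    Line / Site           : " ++ pvVal (r.lookup "line_site")).toList,
              ("    Action Replicated     : " ++ pvVal (r.lookup "action_replicated")).toList,
              ("    Confirmation Method   : " ++ pvVal (r.lookup "confirmation_method")).toList,
              ("    Confirmed By          : " ++ pvVal (r.lookup "confirmed_by")).toList,
              ("" : String).toList] := by
  have h1 : (":\n" : String).toList = ":".toList ++ ['\n'] := rfl
  simp [pvRep, pvTerm, h1, List.append_assoc]

-- A's join equals the terminated concatenation with its final newline dropped
theorem join_eq_dropLast_pvTerm (L : List String) (h : L ≠ []) :
    (PySem.Str.join "\n" L).toList = (pvTerm (L.map String.toList)).dropLast := by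
  rw [PySem.Str.toList_join, pvTerm_eq_join _ (by simpa using h), List.dropLast_concat]
  rfl

theorem fmt_eq (data : List (String × List (List (String × String)))) :
    fmt_d7_prevention_py data = fmt_d7_prevention_py_alt data := by
  apply String.toList_inj.mp
  unfold fmt_d7_prevention_py fmt_d7_prevention_py_alt pvSection
  simp only [PySem.List.foldl_append_eq_flatMap]
  rw [PySem.Str.slice_to_neg_one]
  rw [join_eq_dropLast_pvTerm _ (by split_ifs <;> simp)]
  congr 1
  by_cases h1 : (data.lookup "recurrence_risks").getD [] = [] <;>
    by_cases h2 : (data.lookup "replication_validations").getD [] = [] <;>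
      simp [h1, h2, pvEntries_toList, pvRisk_toList, pvRep_toList, pvTerm,
            List.flatMap_assoc, List.map_flatMap, List.flatMap_cons, List.flatMap_nil,
            List.append_assoc]

-- ===== VERDICT (by name: the statement is the Claim_ definition above) =====
theorem fmt_d7_prevention_py_spec : Claim_equal_fmt_d7_prevention_py := by
  intro data _
  exact fmt_eq data
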